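-- pv_equiv track=rewrite | github.com/sangwonme/Beyond-Python-Course | Algorithm/usaco25jan3.py | count_cows
-- ===== SOURCE A (Python) =====
-- def count_cows(N, a, b):
--     # 결과 저장 배열
--     results = [0] * (N + 1)
--
--     # 현재 상태에서 a[i] == b[i]인 경우 체크
--     original_matches = [1 if a[i] == b[i] else 0 for i in range(N)]
--     original_count = sum(original_matches)
--
--     # 모든 l, r에 대해 검진받는 소의 수 계산
--     for l in range(N):
--         current_matches = original_count
--         for r in range(l, N):
--             # 뒤집기: l <= i <= r이면 검진 가능 여부 반전
--             if a[r] == b[r]: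
--                 current_matches -= 1
--             else:
--                 current_matches += 1
--
--             # 결과 갱신
--             results[current_matches] += 1
--
--     return results
-- ===== SOURCE B (Python) =====
-- def count_cows(N, a, b):
--     # Heights of the prefix walk; flipping [t, u) leaves matches + H[u] - H[t] matches.
--     H = [0]
--     h = 0
--     matches = 0
--     for i in range(N):
--         if a[i] == b[i]:
--             matches += 1
--             h -= 1
--         else:
--             h += 1
--         H.append(h)
--     # first occurrence of every height
--     first = {}
--     for u in range(N + 1):
--         if H[u] not in first:
--             first[H[u]] = u
--     # per height v, sweep the tail once with a running occurrence counter
--     res = [0] * (N + 1)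
--     for v, fv in first.items():
--         base = matches - v
--         c = 0
--         for hu in H[fv:]:
--             res[base + hu] += c
--             if hu == v:
--                 c += 1
--     return res
-- ===== Notes on version B (the rewrite author's own statement) =====
-- stated objective: alternative
-- what changed: Instead of A's enumeration of all O(N^2) flip intervals with an incremental match counter, B computes the prefix-walk height sequence once, groups heights by first occurrence in a dict, and for each height makes one sweep over the tail of the sequence with a running occurrence counter, accumulating interval match-counts directly into the result slots.
import Mathlib
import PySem

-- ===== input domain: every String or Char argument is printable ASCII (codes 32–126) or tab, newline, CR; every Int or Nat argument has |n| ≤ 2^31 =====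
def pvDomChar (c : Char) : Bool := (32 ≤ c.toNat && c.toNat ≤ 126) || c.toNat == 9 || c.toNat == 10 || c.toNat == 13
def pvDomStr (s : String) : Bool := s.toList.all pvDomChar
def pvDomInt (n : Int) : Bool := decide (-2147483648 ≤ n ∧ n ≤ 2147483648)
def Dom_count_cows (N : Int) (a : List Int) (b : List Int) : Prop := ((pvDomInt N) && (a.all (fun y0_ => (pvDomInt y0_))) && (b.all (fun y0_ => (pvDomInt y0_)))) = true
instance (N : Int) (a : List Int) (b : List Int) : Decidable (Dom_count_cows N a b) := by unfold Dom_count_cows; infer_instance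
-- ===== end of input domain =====

-- B replaces A's enumeration of all intervals with an incremental flip counter by a per-height
-- sweep: heights of the prefix walk are grouped by first occurrence and, for each height, one
-- pass over the tail accumulates pair counts into the result slots with a running occurrence
-- counter.

-- ===== PORT A =====
def count_cows (N : Int) (a : List Int) (b : List Int) : List Int :=
  let results := List.replicate (N + 1).toNat (0 : Int)
  let original_matches := (PySem.List.pyRange 0 N 1).map
    (fun i => if PySem.List.pyGet? a i = PySem.List.pyGet? b i then (1 : Int) else 0)
  let original_count := original_matches.sum
  (PySem.List.pyRange 0 N 1).foldl
    (fun results l =>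
      ((PySem.List.pyRange l N 1).foldl
        (fun (st : Int × List Int) r =>
          let current_matches :=
            if PySem.List.pyGet? a r = PySem.List.pyGet? b r then st.1 - 1 else st.1 + 1
          (current_matches,
           PySem.List.pySetD st.2 current_matches
             (PySem.List.pyGetD st.2 current_matches 0 + 1)))
        (original_count, results)).2)
    results

-- ===== PORT B =====
def count_cows_alt (N : Int) (a : List Int) (b : List Int) : List Int :=
  let st := (PySem.List.pyRange 0 N 1).foldl
    (fun (st : List Int × Int × Int) i =>
      let hm := if PySem.List.pyGet? a i = PySem.List.pyGet? b i
                then (st.2.1 - 1, st.2.2 + 1) else (st.2.1 + 1, st.2.2)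
      (st.1 ++ [hm.1], hm.1, hm.2))
    ([(0 : Int)], 0, 0)
  let H := st.1
  let matchesCnt := st.2.2
  let first := (PySem.List.pyRange 0 (N + 1) 1).foldl
    (fun (f : PySem.Dict Int Int) u =>
      let hu := PySem.List.pyGetD H u 0
      if f.contains hu then f else f.insert hu u)
    PySem.Dict.empty
  first.items.foldl
    (fun res p =>
      let base := matchesCnt - p.1
      ((PySem.List.slice H (some p.2) none).foldl
        (fun (st : List Int × Int) hu =>
          (PySem.List.pySetD st.1 (base + hu) (PySem.List.pyGetD st.1 (base + hu) 0 + st.2),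
           if hu = p.1 then st.2 + 1 else st.2))
        (res, 0)).1)
    (List.replicate (N + 1).toNat (0 : Int))

-- ===== PRECONDITION & SPEC =====
-- A indexes a[i], b[i] for i < N: Pre_ excludes exactly the inputs where that raises IndexError.
def Pre_count_cows (N : Int) (a : List Int) (b : List Int) : Prop :=
  N ≤ (a.length : Int) ∧ N ≤ (b.length : Int)
instance (N : Int) (a : List Int) (b : List Int) : Decidable (Pre_count_cows N a b) := by
  unfold Pre_count_cows; infer_instance

def pvWitness_count_cows : Int × List Int × List Int := (3, [1, 2, 3], [1, 0, 3])

def Spec_count_cows (N : Int) (a : List Int) (b : List Int) (out : List Int) : Prop := out = count_cows_alt N a b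
instance (N : Int) (a : List Int) (b : List Int) (out : List Int) : Decidable (Spec_count_cows N a b out) := by unfold Spec_count_cows; infer_instance

-- ===== CLAIM (what is proved, stated in full; the proofs are below) =====
def Claim_equal_count_cows : Prop := ∀ (N : Int) (a : List Int) (b : List Int), Dom_count_cows N a b → Pre_count_cows N a b → Spec_count_cows N a b (count_cows N a b)

-- ===== LEMMAS AND PROOFS =====

-- helper names for the proofs
def pvC (a b : List Int) (i : Int) : Int :=
  if PySem.List.pyGet? a i = PySem.List.pyGet? b i then -1 else 1

def pvM (a b : List Int) (i : Int) : Int :=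
  if PySem.List.pyGet? a i = PySem.List.pyGet? b i then 1 else 0

def pvP (a b : List Int) : Nat → Int
  | 0 => 0
  | k + 1 => pvP a b k + pvC a b k

def pvMc (a b : List Int) : Nat → Int
  | 0 => 0
  | k + 1 => pvMc a b k + pvM a b k

def pvIncr (res : List Int) (v : Int) : List Int :=
  PySem.List.pySetD res v (PySem.List.pyGetD res v 0 + 1)

def pvVals (a b : List Int) (s l e : Int) : List Int :=
  if _h : l < e then
    (s + pvC a b l) :: pvVals a b (s + pvC a b l) (l + 1) e
  else []
termination_by (e - l).toNat
decreasing_by omega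

def pvBigB (a b : List Int) (n : Nat) : List Int :=
  (PySem.List.pyRange 0 n 1).flatMap (fun i =>
    (PySem.List.pyRange (i + 1) (n + 1) 1).map
      (fun j => pvMc a b n + pvP a b j.toNat - pvP a b i.toNat))

-- the common normal form: #{(t,u) : t < u ≤ n, matches + P u - P t = m}
def pvG (a b : List Int) (n : Nat) (m : Int) : Nat :=
  ∑ u ∈ Finset.range (n + 1), ∑ t ∈ Finset.range (n + 1),
    if t < u ∧ pvMc a b n + pvP a b u - pvP a b t = m then 1 else 0

-- the height sequence of the prefix walk (B's list H)
def pvHL (a b : List Int) (n : Nat) : List Int :=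
  (List.range (n + 1)).map (fun t => pvP a b t)

-- the key list of B's dict 'first'
def pvKeysL (a b : List Int) (n : Nat) : List Int :=
  PySem.Set.ofList (pvHL a b n)

-- number of visits of height v strictly before position u
def pvCnt (a b : List Int) (v : Int) (u : Nat) : Nat :=
  (List.range u).countP (fun t => pvP a b t == v)

-- generic: a loop whose body is itself a fold is a fold over the flattened list
theorem pv_foldl_foldl_flatMap {α β γ : Type} (f : γ → β → γ) (h : α → List β) :
    ∀ (L : List α) (init : γ),
      L.foldl (fun acc x => (h x).foldl f acc) init = (L.flatMap h).foldl f init := by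
  intro L
  induction L with
  | nil => intro init; simp
  | cons x xs ih => intro init; simp [List.foldl_append, ih]

theorem pvM_mem (a b : List Int) (i : Int) : pvM a b i = 0 ∨ pvM a b i = 1 := by
  unfold pvM; split <;> simp

theorem pvC_eq (a b : List Int) (i : Int) : pvC a b i = 1 - 2 * pvM a b i := by
  unfold pvC pvM; split <;> ring

theorem pvP_eq (a b : List Int) : ∀ k : Nat, pvP a b k = (k : Int) - 2 * pvMc a b k := by
  intro k
  induction k with
  | zero => simp [pvP, pvMc]
  | succ k ih => simp only [pvP, pvMc, ih, pvC_eq]; push_cast; ring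

theorem pvMc_diff (a b : List Int) : ∀ p q : Nat, p ≤ q →
    0 ≤ pvMc a b q - pvMc a b p ∧ pvMc a b q - pvMc a b p ≤ (q : Int) - p := by
  intro p q hpq
  induction q with
  | zero => interval_cases p; simp [pvMc]
  | succ q ih =>
    rcases Nat.lt_or_ge p (q + 1) with h | h
    · have h1 := ih (by omega)
      have hm := pvM_mem a b q
      simp only [pvMc]
      push_cast
      omega
    · have hpe : p = q + 1 := by omega
      subst hpe
      simp

-- A's inner loop: the running counter visits exactly pvVals, and results is the fold of pvIncr
theorem pv_innerA (a b : List Int) (e : Int) :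
    ∀ (fuel : Nat) (l s : Int) (res : List Int), (e - l).toNat = fuel →
      (PySem.List.pyRange l e 1).foldl
        (fun (st : Int × List Int) r =>
          let current_matches :=
            if PySem.List.pyGet? a r = PySem.List.pyGet? b r then st.1 - 1 else st.1 + 1
          (current_matches,
           PySem.List.pySetD st.2 current_matches
             (PySem.List.pyGetD st.2 current_matches 0 + 1)))
        (s, res)
      = ((pvVals a b s l e).getLastD s, (pvVals a b s l e).foldl pvIncr res) := by
  intro fuel
  induction fuel with
  | zero =>
    intro l s res hf
    have he : ¬ l < e := by omega
    rw [pvVals, dif_neg he, PySem.List.pyRange_one_eq_nil (by omega)]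
    simp
  | succ fuel ih =>
    intro l s res hf
    have hlt : l < e := by omega
    have hs : (if PySem.List.pyGet? a l = PySem.List.pyGet? b l then s - 1 else s + 1)
        = s + pvC a b l := by
      unfold pvC
      split
      · ring
      · ring
    rw [PySem.List.pyRange_one_cons hlt, pvVals, dif_pos hlt]
    simp only [List.foldl_cons, hs]
    rw [ih (l + 1) (s + pvC a b l)
        (PySem.List.pySetD res (s + pvC a b l) (PySem.List.pyGetD res (s + pvC a b l) 0 + 1))
        (by omega)]
    refine Prod.ext ?_ rfl
    cases pvVals a b (s + pvC a b l) (l + 1) e <;> simp [List.getLastD]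

-- A as one fold of pvIncr over the flattened value list
theorem pv_countA_char (N : Int) (a b : List Int) :
    count_cows N a b =
      ((PySem.List.pyRange 0 N 1).flatMap (fun l =>
          pvVals a b (((PySem.List.pyRange 0 N 1).map
            (fun i => if PySem.List.pyGet? a i = PySem.List.pyGet? b i then (1 : Int) else 0)).sum) l N)).foldl
        pvIncr (List.replicate (N + 1).toNat 0) := by
  unfold count_cows
  rw [← pv_foldl_foldl_flatMap]
  apply PySem.List.foldl_congr_mem
  intro res l _
  rw [pv_innerA a b N (N - l).toNat l _ res rfl]

-- pvVals in closed prefix-sum form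
theorem pv_vals_closed (a b : List Int) :
    ∀ (fuel : Nat) (l e s : Int), (e - l).toNat = fuel → 0 ≤ l →
      pvVals a b s l e =
        (PySem.List.pyRange (l + 1) (e + 1) 1).map
          (fun j => s + pvP a b j.toNat - pvP a b l.toNat) := by
  intro fuel
  induction fuel with
  | zero =>
    intro l e s hf hl
    have he : ¬ l < e := by omega
    rw [pvVals, dif_neg he, PySem.List.pyRange_one_eq_nil (by omega)]
    simp
  | succ fuel ih =>
    intro l e s hf hl
    have hlt : l < e := by omega
    rw [pvVals, dif_pos hlt, PySem.List.pyRange_one_cons (by omega : l + 1 < e + 1),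
        List.map_cons]
    have hsucc : (l + 1).toNat = l.toNat + 1 := by omega
    have hcast : (l.toNat : Int) = l := by omega
    congr 1
    · rw [hsucc]
      simp only [pvP, hcast]
      ring
    · rw [ih (l + 1) e (s + pvC a b l) (by omega) (by omega)]
      apply List.map_congr_left
      intro j hj
      rw [hsucc]
      simp only [pvP, hcast]
      ring

-- the 0/1 indicator sum in A is pvMc
theorem pv_sum_matches (a b : List Int) : ∀ n : Nat,
    ((PySem.List.pyRange 0 (n : Int) 1).map
      (fun i => if PySem.List.pyGet? a i = PySem.List.pyGet? b i then (1 : Int) else 0)).sum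
    = pvMc a b n := by
  intro n
  induction n with
  | zero => simp [pvMc]
  | succ n ih =>
    have hc : ((n + 1 : Nat) : Int) = (n : Int) + 1 := by push_cast; ring
    rw [hc, PySem.List.pyRange_one_succ_right (by omega)]
    simp only [List.map_append, List.sum_append, ih, List.map_cons, List.map_nil,
      List.sum_cons, List.sum_nil, pvMc, pvM]
    ring

-- every histogrammed value is a legal index
theorem pv_bigB_bound (a b : List Int) (n : Nat) :
    ∀ v ∈ pvBigB a b n, 0 ≤ v ∧ v < (n : Int) + 1 := by
  intro v hv
  unfold pvBigB at hv
  rw [List.mem_flatMap] at hv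
  obtain ⟨i, hi, hv⟩ := hv
  rw [List.mem_map] at hv
  obtain ⟨j, hj, rfl⟩ := hv
  have hi' := (PySem.List.mem_pyRange_one).1 hi
  have hj' := (PySem.List.mem_pyRange_one).1 hj
  have h1 := pvMc_diff a b i.toNat j.toNat (by omega)
  have h2 := pvMc_diff a b j.toNat n (by omega)
  have h3 := pvMc_diff a b 0 i.toNat (by omega)
  have e1 := pvP_eq a b i.toNat
  have e2 := pvP_eq a b j.toNat
  simp only [pvMc] at h3
  have hi0 : (i.toNat : Int) = i := by omega
  have hj0 : (j.toNat : Int) = j := by omega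
  rw [hi0] at e1
  rw [hj0] at e2
  omega

-- the positional-increment fold keeps its length …
theorem pv_incr_length : ∀ (L : List Int) (res : List Int),
    (L.foldl pvIncr res).length = res.length := by
  intro L
  induction L with
  | nil => intro res; simp
  | cons v L ih =>
    intro res
    simp only [List.foldl_cons, ih, pvIncr, PySem.List.length_pySetD]

-- … and ends up holding the count of each index
theorem pv_incr_count : ∀ (L : List Int) (res : List Int),
    (∀ v ∈ L, 0 ≤ v ∧ v < (res.length : Int)) →
    ∀ (k : Nat) (hk : k < res.length),
      (L.foldl pvIncr res)[k]'(by rw [pv_incr_length]; exact hk)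
        = res[k] + L.count (k : Int) := by
  intro L
  induction L with
  | nil => intro res _ k hk; simp
  | cons v L ih =>
    intro res hmem k hk
    have hv := hmem v List.mem_cons_self
    have hvlt : v.toNat < res.length := by omega
    have hset : pvIncr res v = res.set v.toNat (res[v.toNat]'hvlt + 1) := by
      unfold pvIncr
      rw [PySem.List.pySetD_of_nonneg _ _ hv.1,
          PySem.List.pyGetD_eq_getElem _ _ hv.1 hv.2]
    simp only [List.foldl_cons, hset]
    have hmem' : ∀ w ∈ L, 0 ≤ w ∧ w < (((res.set v.toNat (res[v.toNat]'hvlt + 1)).length : Nat) : Int) := by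
      intro w hw
      have := hmem w (List.mem_cons_of_mem _ hw)
      simpa [List.length_set] using this
    rw [ih _ hmem' k (by simpa [List.length_set] using hk)]
    by_cases hkv : v = (k : Int)
    · subst hkv
      have htk : ((k : Int)).toNat = k := by omega
      simp only [htk, List.getElem_set_self, List.count_cons_self]
      push_cast
      ring
    · have hne : v.toNat ≠ k := by omega
      rw [List.getElem_set_ne hne]
      simp [hkv]

-- the flattened value list of A is pvBigB
theorem pv_big_eq (a b : List Int) (n : Nat) :
    ((PySem.List.pyRange 0 (n : Int) 1).flatMap (fun l =>
        pvVals a b (((PySem.List.pyRange 0 (n : Int) 1).map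
          (fun i => if PySem.List.pyGet? a i = PySem.List.pyGet? b i then (1 : Int) else 0)).sum) l (n : Int)))
      = pvBigB a b n := by
  unfold pvBigB
  apply List.flatMap_congr
  intro l hl
  have hl' := (PySem.List.mem_pyRange_one).1 hl
  rw [pv_sum_matches a b n,
      pv_vals_closed a b ((n : Int) - l).toNat l (n : Int) (pvMc a b n) rfl (by omega)]

-- A is the histogram of pvBigB, slot by slot
theorem pv_A_mapcount (a b : List Int) (n : Nat) :
    count_cows (n : Int) a b =
      (PySem.List.pyRange 0 ((n : Int) + 1) 1).map (fun m => ((pvBigB a b n).count m : Int)) := by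
  rw [pv_countA_char, pv_big_eq]
  have hlen : (((n : Int) + 1).toNat) = n + 1 := by omega
  have hbound : ∀ v ∈ pvBigB a b n,
      0 ≤ v ∧ v < ((List.replicate (((n : Int) + 1).toNat) (0 : Int)).length : Int) := by
    intro v hv
    have := pv_bigB_bound a b n v hv
    rw [List.length_replicate, hlen]
    push_cast
    omega
  apply List.ext_getElem
  · rw [pv_incr_length, List.length_replicate, hlen, List.length_map,
        PySem.List.length_pyRange_one]
    omega
  · intro k hk1 hk2
    have hk : k < n + 1 := by
      rw [pv_incr_length, List.length_replicate, hlen] at hk1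
      exact hk1
    rw [pv_incr_count (pvBigB a b n) _ hbound k (by rw [List.length_replicate, hlen]; exact hk)]
    rw [List.getElem_map, PySem.List.getElem_pyRange_one]
    simp

-- glue: counts and sums over List.range as Finset sums
theorem pv_count_flatMap {α : Type} [BEq α] (l : List Int) (f : Int → List α) (x : α) :
    (l.flatMap f).count x = (l.map (fun a => (f a).count x)).sum := by
  induction l with
  | nil => simp
  | cons y l ih => simp [List.count_append, ih]

theorem pv_sum_map_range {M : Type} [AddCommMonoid M] (k : Nat) (f : Nat → M) :
    ((List.range k).map f).sum = ∑ t ∈ Finset.range k, f t := by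
  induction k with
  | zero => simp
  | succ k ih => rw [List.range_succ, Finset.sum_range_succ]; simp [ih]

theorem pv_countP_range (p : Nat → Bool) (k : Nat) :
    (List.range k).countP p = ∑ x ∈ Finset.range k, if p x then 1 else 0 := by
  induction k with
  | zero => simp
  | succ k ih =>
    rw [List.range_succ, Finset.sum_range_succ, List.countP_append, ih]
    simp [List.countP_cons]

-- A's histogram slot m is pvG m
theorem pv_countA_G (a b : List Int) (n : Nat) (m : Int) :
    (pvBigB a b n).count m = pvG a b n m := by
  unfold pvBigB
  rw [pv_count_flatMap, PySem.List.pyRange_zero_nat]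
  rw [List.map_map, pv_sum_map_range]
  have hstep : ∀ t ∈ Finset.range n,
      ((fun aIdx => (((PySem.List.pyRange (aIdx + 1) ((n : Int) + 1) 1).map
          (fun j => pvMc a b n + pvP a b j.toNat - pvP a b aIdx.toNat)).count m)) ∘ fun k : Nat => (k : Int)) t
      = ∑ u ∈ Finset.range (n + 1), ((if t < u ∧ pvMc a b n + pvP a b u - pvP a b t = m then 1 else 0) : Nat) := by
    intro t ht
    have htn : t < n := Finset.mem_range.1 ht
    simp only [Function.comp]
    rw [List.count_eq_countP, List.countP_map, PySem.List.pyRange_one]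
    have hlen : (((n : Int) + 1) - ((t : Int) + 1)).toNat = n - t := by omega
    rw [hlen, List.countP_map, pv_countP_range]
    have hsum : ∀ k ∈ Finset.range (n - t),
        (if (((fun x => x == m) ∘ (fun j : Int => pvMc a b n + pvP a b j.toNat - pvP a b ((t : Int)).toNat))
            ∘ fun k : Nat => (t : Int) + 1 + (k : Int)) k then 1 else 0)
        = ((if pvMc a b n + pvP a b (t + 1 + k) - pvP a b t = m then 1 else 0) : Nat) := by
      intro k _
      have hcast : ((t : Int) + 1 + (k : Int)).toNat = t + 1 + k := by omega
      have hcast2 : ((t : Int)).toNat = t := by omega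
      simp only [Function.comp, hcast, hcast2, beq_iff_eq]
    rw [Finset.sum_congr rfl hsum]
    have hIco : (∑ k ∈ Finset.range (n - t), ((if pvMc a b n + pvP a b (t + 1 + k) - pvP a b t = m then 1 else 0) : Nat))
        = ∑ u ∈ Finset.Ico (t + 1) (n + 1), ((if pvMc a b n + pvP a b u - pvP a b t = m then 1 else 0) : Nat) := by
      rw [Finset.sum_Ico_eq_sum_range]
      have : n + 1 - (t + 1) = n - t := by omega
      rw [this]
    rw [hIco]
    have h1 : (∑ u ∈ Finset.Ico (t + 1) (n + 1), ((if pvMc a b n + pvP a b u - pvP a b t = m then 1 else 0) : Nat))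
        = ∑ u ∈ Finset.Ico (t + 1) (n + 1), ((if t < u ∧ pvMc a b n + pvP a b u - pvP a b t = m then 1 else 0) : Nat) := by
      apply Finset.sum_congr rfl
      intro u hu
      rw [Finset.mem_Ico] at hu
      have htu : t < u := by omega
      by_cases hc : pvMc a b n + pvP a b u - pvP a b t = m <;> simp [hc, htu]
    rw [h1]
    apply Finset.sum_subset
    · intro u hu
      rw [Finset.mem_Ico] at hu
      exact Finset.mem_range.2 hu.2
    · intro u hu hnu
      rw [Finset.mem_Ico] at hnu
      rw [Finset.mem_range] at hu
      have htu : ¬ t < u := by omega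
      simp [htu]
  rw [Finset.sum_congr rfl hstep]
  have hext : (∑ t ∈ Finset.range n, ∑ u ∈ Finset.range (n + 1),
        ((if t < u ∧ pvMc a b n + pvP a b u - pvP a b t = m then 1 else 0) : Nat))
      = ∑ t ∈ Finset.range (n + 1), ∑ u ∈ Finset.range (n + 1),
        ((if t < u ∧ pvMc a b n + pvP a b u - pvP a b t = m then 1 else 0) : Nat) := by
    apply Finset.sum_subset
    · intro x hx
      rw [Finset.mem_range] at hx ⊢
      omega
    · intro t ht hnt
      apply Finset.sum_eq_zero
      intro u hu
      rw [Finset.mem_range] at ht hu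
      rw [Finset.mem_range] at hnt
      have : ¬ t < u := by omega
      simp [this]
  rw [hext]
  unfold pvG
  rw [Finset.sum_comm]

-- ===== B-side lemmas =====

-- weighted positional increment: res[idx] += c
def pvAddC (res : List Int) (p : Int × Int) : List Int :=
  PySem.List.pySetD res p.1 (PySem.List.pyGetD res p.1 0 + p.2)

-- the (slot, weight) entries a sweep for height v emits
def pvEmit (v base : Int) : Int → List Int → List (Int × Int)
  | _, [] => []
  | c, hu :: L => (base + hu, c) :: pvEmit v base (if hu = v then c + 1 else c) L

-- PySem.Set.ofList on an appended element
theorem pv_ofList_append_mem {α : Type} [BEq α] [LawfulBEq α] (l : List α) (x : α) (h : x ∈ l) :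
    PySem.Set.ofList (l ++ [x]) = PySem.Set.ofList l := by
  unfold PySem.Set.ofList
  rw [List.foldl_append]
  simp only [List.foldl_cons, List.foldl_nil, PySem.Set.add]
  rw [if_pos]
  rw [PySem.Set.contains_iff,
      show List.foldl PySem.Set.add PySem.Set.empty l = PySem.Set.ofList l from rfl,
      PySem.Set.mem_ofList]
  exact h

theorem pv_ofList_append_not_mem {α : Type} [BEq α] [LawfulBEq α] (l : List α) (x : α) (h : x ∉ l) :
    PySem.Set.ofList (l ++ [x]) = PySem.Set.ofList l ++ [x] := by
  unfold PySem.Set.ofList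
  rw [List.foldl_append]
  simp only [List.foldl_cons, List.foldl_nil, PySem.Set.add]
  rw [if_neg]
  rw [PySem.Set.contains_iff,
      show List.foldl PySem.Set.add PySem.Set.empty l = PySem.Set.ofList l from rfl,
      PySem.Set.mem_ofList]
  exact h

-- B's first loop builds the height sequence
theorem pv_H_char (a b : List Int) : ∀ n : Nat,
    (PySem.List.pyRange 0 (n : Int) 1).foldl
      (fun (st : List Int × Int × Int) i =>
        let hm := if PySem.List.pyGet? a i = PySem.List.pyGet? b i
                  then (st.2.1 - 1, st.2.2 + 1) else (st.2.1 + 1, st.2.2)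
        (st.1 ++ [hm.1], hm.1, hm.2))
      ([(0 : Int)], 0, 0)
    = (pvHL a b n, pvP a b n, pvMc a b n) := by
  intro n
  induction n with
  | zero => simp [pvP, pvMc, pvHL, List.range_succ]
  | succ n ih =>
    have hc : ((n + 1 : Nat) : Int) = (n : Int) + 1 := by push_cast; ring
    rw [hc, PySem.List.pyRange_one_succ_right (by omega), List.foldl_append, ih]
    simp only [List.foldl_cons, List.foldl_nil]
    have hrange : pvHL a b (n + 1) = pvHL a b n ++ [pvP a b (n + 1)] := by
      unfold pvHL
      rw [List.range_succ, List.map_append]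
      simp
    rw [hrange]
    by_cases h : PySem.List.pyGet? a (n : Int) = PySem.List.pyGet? b (n : Int)
    · have hP : pvP a b (n + 1) = pvP a b n - 1 := by
        simp only [pvP, pvC, if_pos h]; ring
      have hM : pvMc a b (n + 1) = pvMc a b n + 1 := by
        simp only [pvMc, pvM, if_pos h]
      simp only [if_pos h, hP, hM]
    · have hP : pvP a b (n + 1) = pvP a b n + 1 := by
        simp only [pvP, pvC, if_neg h]
      have hM : pvMc a b (n + 1) = pvMc a b n := by
        simp only [pvMc, pvM, if_neg h]; ring
      simp only [if_neg h, hP, hM]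

-- B's second loop: the dict of first occurrences of each height
theorem pv_first_char (a b : List Int) (n : Nat) : ∀ k : Nat, k ≤ n + 1 →
    ((PySem.List.pyRange 0 (k : Int) 1).foldl
        (fun (f : PySem.Dict Int Int) u =>
          let hu := PySem.List.pyGetD (pvHL a b n) u 0
          if f.contains hu then f else f.insert hu u)
        PySem.Dict.empty).keys = PySem.Set.ofList ((pvHL a b n).take k)
    ∧ ∀ v : Int,
      ((PySem.List.pyRange 0 (k : Int) 1).foldl
        (fun (f : PySem.Dict Int Int) u =>
          let hu := PySem.List.pyGetD (pvHL a b n) u 0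
          if f.contains hu then f else f.insert hu u)
        PySem.Dict.empty).get? v
      = (PySem.List.index? ((pvHL a b n).take k) v).map (fun j : Nat => (j : Int)) := by
  intro k
  induction k with
  | zero =>
    intro _
    constructor
    · simp [PySem.Set.ofList]
    · intro v
      rw [PySem.List.index?_eq_idxOf?]
      simp
  | succ k ih =>
    intro hk1
    obtain ⟨ihK, ihG⟩ := ih (by omega)
    have hlen : (pvHL a b n).length = n + 1 := by
      unfold pvHL; simp
    have hklen : k < (pvHL a b n).length := by omega
    have hc : ((k + 1 : Nat) : Int) = (k : Int) + 1 := by push_cast; ring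
    have hget : PySem.List.pyGetD (pvHL a b n) (k : Int) 0 = (pvHL a b n)[k] := by
      rw [PySem.List.pyGetD_natCast, List.getD_eq_getElem _ _ hklen]
    have htake : (pvHL a b n).take (k + 1) = (pvHL a b n).take k ++ [(pvHL a b n)[k]] :=
      List.take_succ_eq_append_getElem hklen
    rw [hc, PySem.List.pyRange_one_succ_right (by omega), List.foldl_append]
    simp only [List.foldl_cons, List.foldl_nil, hget]
    by_cases hmem : (pvHL a b n)[k] ∈ (pvHL a b n).take k
    · have hcont : (((PySem.List.pyRange 0 (k : Int) 1).foldl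
          (fun (f : PySem.Dict Int Int) u =>
            let hu := PySem.List.pyGetD (pvHL a b n) u 0
            if f.contains hu then f else f.insert hu u)
          PySem.Dict.empty)).contains ((pvHL a b n)[k]) = true := by
        rw [PySem.Dict.contains_iff_mem_keys, ihK, PySem.Set.mem_ofList]
        exact hmem
      rw [if_pos hcont]
      constructor
      · rw [ihK, htake, pv_ofList_append_mem _ _ hmem]
      · intro v
        rw [ihG v, htake]
        by_cases hv : v ∈ (pvHL a b n).take k
        · rw [PySem.List.index?_append_of_mem _ hv]
        · have hv2 : v ∉ (pvHL a b n).take k ++ [(pvHL a b n)[k]] := by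
            intro hcon
            rcases List.mem_append.1 hcon with h1 | h2
            · exact hv h1
            · rw [List.mem_singleton] at h2
              subst h2
              exact hv hmem
          rw [(PySem.List.index?_eq_none_iff _ _).2 hv,
              (PySem.List.index?_eq_none_iff _ _).2 hv2]
    · have hcont : (((PySem.List.pyRange 0 (k : Int) 1).foldl
          (fun (f : PySem.Dict Int Int) u =>
            let hu := PySem.List.pyGetD (pvHL a b n) u 0
            if f.contains hu then f else f.insert hu u)
          PySem.Dict.empty)).contains ((pvHL a b n)[k]) = false := by
        rw [Bool.eq_false_iff]
        intro hcon
        rw [PySem.Dict.contains_iff_mem_keys, ihK, PySem.Set.mem_ofList] at hcon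
        exact hmem hcon
      rw [if_neg (by rw [hcont]; simp)]
      constructor
      · rw [PySem.Dict.keys_insert_of_not_contains _ _ hcont, ihK, htake,
            pv_ofList_append_not_mem _ _ hmem]
      · intro v
        rw [PySem.Dict.get?_insert, htake]
        by_cases hv : v = (pvHL a b n)[k]
        · subst hv
          rw [if_pos rfl, PySem.List.index?_append_singleton_self _ _ hmem]
          simp only [Option.map_some]
          congr 1
          rw [List.length_take]
          omega
        · rw [if_neg hv, ihG v]
          by_cases hv2 : v ∈ (pvHL a b n).take k
          · rw [PySem.List.index?_append_of_mem _ hv2]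
          · have hv3 : v ∉ (pvHL a b n).take k ++ [(pvHL a b n)[k]] := by
              intro hcon
              rcases List.mem_append.1 hcon with h1 | h2
              · exact hv2 h1
              · rw [List.mem_singleton] at h2
                exact hv h2
            rw [(PySem.List.index?_eq_none_iff _ _).2 hv2,
                (PySem.List.index?_eq_none_iff _ _).2 hv3]

-- the inner sweep is the fold of pvAddC over its emissions
theorem pv_sweep (v base : Int) : ∀ (L : List Int) (res : List Int) (c : Int),
    ((L.foldl (fun (st : List Int × Int) hu =>
        (PySem.List.pySetD st.1 (base + hu) (PySem.List.pyGetD st.1 (base + hu) 0 + st.2),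
         if hu = v then st.2 + 1 else st.2)) (res, c)).1)
    = (pvEmit v base c L).foldl pvAddC res := by
  intro L
  induction L with
  | nil => intro res c; simp [pvEmit]
  | cons hu L ih =>
    intro res c
    simp only [List.foldl_cons, pvEmit, pvAddC]
    rw [ih]

-- counts of v along a contiguous index block characterize the emissions
theorem pv_emit_closed (a b : List Int) (v base : Int) : ∀ (len s : Nat),
    pvEmit v base ((pvCnt a b v s : Nat) : Int) ((List.range' s len).map (fun t => pvP a b t))
    = (List.range' s len).map (fun u => (base + pvP a b u, ((pvCnt a b v u : Nat) : Int))) := by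
  intro len
  induction len with
  | zero => intro s; simp [pvEmit]
  | succ len ih =>
    intro s
    rw [List.range'_succ, List.map_cons, List.map_cons]
    simp only [pvEmit]
    have hstep : (if pvP a b s = v then ((pvCnt a b v s : Nat) : Int) + 1
        else ((pvCnt a b v s : Nat) : Int)) = ((pvCnt a b v (s + 1) : Nat) : Int) := by
      unfold pvCnt
      rw [List.range_succ, List.countP_append]
      by_cases h : pvP a b s = v <;> simp [h]
    rw [hstep, ih (s + 1)]

-- the weighted-increment fold keeps its length …
theorem pv_addc_length : ∀ (E : List (Int × Int)) (res : List Int),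
    (E.foldl pvAddC res).length = res.length := by
  intro E
  induction E with
  | nil => intro res; simp
  | cons p E ih =>
    intro res
    simp only [List.foldl_cons, ih, pvAddC, PySem.List.length_pySetD]

-- … and ends holding, in each slot, the sum of the weights aimed at it
theorem pv_addc_sum : ∀ (E : List (Int × Int)) (res : List Int),
    (∀ p ∈ E, 0 ≤ p.1 ∧ p.1 < (res.length : Int)) →
    ∀ (k : Nat) (hk : k < res.length),
      (E.foldl pvAddC res)[k]'(by rw [pv_addc_length]; exact hk)
        = res[k] + (E.map (fun p => if p.1 = (k : Int) then p.2 else 0)).sum := by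
  intro E
  induction E with
  | nil => intro res _ k hk; simp
  | cons p E ih =>
    intro res hmem k hk
    have hv := hmem p List.mem_cons_self
    have hvlt : p.1.toNat < res.length := by omega
    have hset : pvAddC res p = res.set p.1.toNat (res[p.1.toNat]'hvlt + p.2) := by
      unfold pvAddC
      rw [PySem.List.pySetD_of_nonneg _ _ hv.1,
          PySem.List.pyGetD_eq_getElem _ _ hv.1 hv.2]
    simp only [List.foldl_cons, hset]
    have hmem' : ∀ q ∈ E, 0 ≤ q.1 ∧ q.1 < (((res.set p.1.toNat (res[p.1.toNat]'hvlt + p.2)).length : Nat) : Int) := by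
      intro q hq
      have := hmem q (List.mem_cons_of_mem _ hq)
      simpa [List.length_set] using this
    rw [ih _ hmem' k (by simpa [List.length_set] using hk)]
    by_cases hkv : p.1 = (k : Int)
    · have htk : p.1.toNat = k := by omega
      simp only [htk, List.getElem_set_self, List.map_cons, List.sum_cons, if_pos hkv]
      ring
    · have hne : p.1.toNat ≠ k := by omega
      rw [List.getElem_set_ne hne]
      simp only [List.map_cons, List.sum_cons, if_neg hkv]
      ring

-- every emitted slot is a legal index
theorem pv_idx_bound (a b : List Int) (n : Nat) : ∀ t u : Nat, t ≤ u → u ≤ n →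
    0 ≤ pvMc a b n + pvP a b u - pvP a b t ∧ pvMc a b n + pvP a b u - pvP a b t < (n : Int) + 1 := by
  intro t u htu hun
  have h1 := pvMc_diff a b t u (by omega)
  have h2 := pvMc_diff a b u n (by omega)
  have h3 := pvMc_diff a b 0 t (by omega)
  have e1 := pvP_eq a b t
  have e2 := pvP_eq a b u
  simp only [pvMc] at h3
  omega

-- pvHL is P, pointwise
theorem pv_HL_getElem (a b : List Int) (n : Nat) (k : Nat) (hk : k < (pvHL a b n).length) :
    (pvHL a b n)[k] = pvP a b k := by
  unfold pvHL at hk ⊢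
  simp

theorem pv_HL_length (a b : List Int) (n : Nat) : (pvHL a b n).length = n + 1 := by
  unfold pvHL; simp

-- before its first occurrence a height has no visits
theorem pv_cnt_before_first (a b : List Int) (n : Nat) (v : Int) (j : Nat)
    (hj : PySem.List.index? (pvHL a b n) v = some j) :
    ∀ u : Nat, u ≤ j → pvCnt a b v u = 0 := by
  obtain ⟨hjlen, hvj, hbefore⟩ := PySem.List.getElem_of_index?_eq_some hj
  intro u hu
  unfold pvCnt
  rw [List.countP_eq_zero]
  intro t ht
  rw [List.mem_range] at ht
  have h1 : t < j := by omega
  have h2 := hbefore t (by omega)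
  rw [pv_HL_getElem a b n t (by rw [pv_HL_length]; rw [pv_HL_length] at hjlen; omega)] at h2
  simp only [beq_iff_eq]
  exact h2

-- the first-occurrence index of a key
theorem pv_key_first (a b : List Int) (n : Nat) (v : Int) (hv : v ∈ pvKeysL a b n) :
    ∃ j : Nat, PySem.List.index? (pvHL a b n) v = some j ∧ j ≤ n ∧ pvP a b j = v := by
  unfold pvKeysL at hv
  rw [PySem.Set.mem_ofList] at hv
  have := (PySem.List.index?_isSome_iff (pvHL a b n) v).2 hv
  obtain ⟨j, hj⟩ := Option.isSome_iff_exists.1 this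
  obtain ⟨hjlen, hvj, _⟩ := PySem.List.getElem_of_index?_eq_some hj
  refine ⟨j, hj, ?_, ?_⟩
  · rw [pv_HL_length] at hjlen; omega
  · rw [pv_HL_getElem] at hvj
    exact hvj

-- the visit count, extended over the whole index range
theorem pv_cnt_ext (a b : List Int) (n : Nat) (v : Int) (u : Nat) (hu : u ≤ n + 1) :
    ((pvCnt a b v u : Nat) : Int)
      = ∑ t ∈ Finset.range (n + 1), if t < u ∧ pvP a b t = v then (1 : Int) else 0 := by
  unfold pvCnt
  rw [pv_countP_range]
  push_cast
  have h1 : (∑ t ∈ Finset.range u, if (pvP a b t == v) = true then (1 : Int) else 0)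
      = ∑ t ∈ Finset.range u, if t < u ∧ pvP a b t = v then (1 : Int) else 0 := by
    apply Finset.sum_congr rfl
    intro t ht
    rw [Finset.mem_range] at ht
    by_cases h : pvP a b t = v <;> simp [h, ht]
  rw [h1]
  apply Finset.sum_subset
  · intro t ht
    rw [Finset.mem_range] at ht ⊢
    omega
  · intro t ht hnt
    rw [Finset.mem_range] at hnt
    have h2 : ¬ t < u := by omega
    simp [h2]

-- the first-occurrence index of height v, and the emission list of its sweep
def pvFv (a b : List Int) (n : Nat) (v : Int) : Nat :=
  (PySem.List.index? (pvHL a b n) v).getD 0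

def pvEmitL (a b : List Int) (n : Nat) (v : Int) : List (Int × Int) :=
  (List.range' (pvFv a b n v) (n + 1 - pvFv a b n v)).map
    (fun u => (pvMc a b n - v + pvP a b u, ((pvCnt a b v u : Nat) : Int)))

-- glue: the sum of a flatMap
theorem pv_sum_flatMap {α : Type} (l : List α) (f : α → List Int) :
    (l.flatMap f).sum = (l.map (fun x => (f x).sum)).sum := by
  induction l with
  | nil => simp
  | cons x l ih => simp [ih]

-- summing each key's slot-m emissions over all keys counts all ordered pairs: pvG
theorem pv_total (a b : List Int) (n : Nat) (m : Int) :
    ((pvKeysL a b n).map (fun v =>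
        ∑ u ∈ Finset.range (n + 1), (if pvP a b u = v + (m - pvMc a b n) then
          (∑ t ∈ Finset.range (n + 1), if t < u ∧ pvP a b t = v then (1 : Int) else 0) else 0))).sum
      = (pvG a b n m : Int) := by
  have hnd : (pvKeysL a b n).Nodup := PySem.Set.nodup_ofList _
  rw [← List.sum_toFinset _ hnd]
  have hstep : ∀ v ∈ (pvKeysL a b n).toFinset,
      (∑ u ∈ Finset.range (n + 1), (if pvP a b u = v + (m - pvMc a b n) then
          (∑ t ∈ Finset.range (n + 1), if t < u ∧ pvP a b t = v then (1 : Int) else 0) else 0))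
      = ∑ u ∈ Finset.range (n + 1), ∑ t ∈ Finset.range (n + 1),
          (if pvP a b u = v + (m - pvMc a b n) ∧ t < u ∧ pvP a b t = v then (1 : Int) else 0) := by
    intro v _
    apply Finset.sum_congr rfl
    intro u _
    by_cases h : pvP a b u = v + (m - pvMc a b n)
    · rw [if_pos h]
      apply Finset.sum_congr rfl
      intro t _
      by_cases hc : t < u ∧ pvP a b t = v <;> simp [h, hc]
    · rw [if_neg h]
      rw [Finset.sum_eq_zero]
      intro t _
      simp [h]
  rw [Finset.sum_congr rfl hstep]
  rw [Finset.sum_comm]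
  have hswap : ∀ u ∈ Finset.range (n + 1),
      (∑ v ∈ (pvKeysL a b n).toFinset, ∑ t ∈ Finset.range (n + 1),
        (if pvP a b u = v + (m - pvMc a b n) ∧ t < u ∧ pvP a b t = v then (1 : Int) else 0))
      = ∑ t ∈ Finset.range (n + 1),
          (if t < u ∧ pvMc a b n + pvP a b u - pvP a b t = m then (1 : Int) else 0) := by
    intro u _
    rw [Finset.sum_comm]
    apply Finset.sum_congr rfl
    intro t ht
    have hmem : pvP a b t ∈ (pvKeysL a b n).toFinset := by
      rw [List.mem_toFinset]
      unfold pvKeysL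
      rw [PySem.Set.mem_ofList]
      unfold pvHL
      exact List.mem_map.2 ⟨t, List.mem_range.2 (Finset.mem_range.1 ht), rfl⟩
    have hrw : ∀ v ∈ (pvKeysL a b n).toFinset,
        (if pvP a b u = v + (m - pvMc a b n) ∧ t < u ∧ pvP a b t = v then (1 : Int) else 0)
        = (if v = pvP a b t then
            (if t < u ∧ pvMc a b n + pvP a b u - pvP a b t = m then (1 : Int) else 0) else 0) := by
      intro v _
      by_cases hv : v = pvP a b t
      · subst hv
        by_cases hc : t < u ∧ pvMc a b n + pvP a b u - pvP a b t = m
        · rw [if_pos (by constructor <;> [omega; exact ⟨hc.1, rfl⟩]), if_pos rfl, if_pos hc]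
        · rw [if_neg (by intro hcon; exact hc ⟨hcon.2.1, by omega⟩), if_pos rfl, if_neg hc]
      · rw [if_neg (by intro hcon; exact hv hcon.2.2.symm), if_neg hv]
    rw [Finset.sum_congr rfl hrw, Finset.sum_ite_eq' _ (pvP a b t), if_pos hmem]
  rw [Finset.sum_congr rfl hswap]
  unfold pvG
  push_cast
  apply Finset.sum_congr rfl
  intro u _
  apply Finset.sum_congr rfl
  intro t _
  by_cases hc : t < u ∧ pvMc a b n + pvP a b u - pvP a b t = m <;> simp [hc]

-- B computes pvG, slot by slot
theorem pv_B_mapG (a b : List Int) (n : Nat) :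
    count_cows_alt (n : Int) a b =
      (PySem.List.pyRange 0 ((n : Int) + 1) 1).map (fun m => (pvG a b n m : Int)) := by
  simp only [count_cows_alt, pv_H_char a b n]
  have hc : ((n : Int) + 1) = ((n + 1 : Nat) : Int) := by push_cast; ring
  obtain ⟨hkeys, hget⟩ := pv_first_char a b n (n + 1) (by omega)
  rw [show (PySem.List.pyRange 0 ((n : Int) + 1) 1) = (PySem.List.pyRange 0 ((n + 1 : Nat) : Int) 1) by rw [hc]] at *
  rw [List.take_of_length_le (by rw [pv_HL_length])] at hkeys hget
  set first := ((PySem.List.pyRange 0 ((n + 1 : Nat) : Int) 1).foldl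
      (fun (f : PySem.Dict Int Int) u =>
        let hu := PySem.List.pyGetD (pvHL a b n) u 0
        if f.contains hu then f else f.insert hu u)
      PySem.Dict.empty) with hfirst
  have hnd : first.keys.Nodup := by rw [hkeys]; exact PySem.Set.nodup_ofList _
  rw [PySem.Dict.items_eq_map_keys first hnd 0, hkeys]
  rw [List.foldl_map]
  simp only []
  have hbody : ∀ (acc : List Int), ∀ v ∈ PySem.Set.ofList (pvHL a b n),
      (List.foldl
          (fun (st : List Int × Int) hu =>
            (PySem.List.pySetD st.1 (pvMc a b n - v + hu)
                (PySem.List.pyGetD st.1 (pvMc a b n - v + hu) 0 + st.2),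
              if hu = v then st.2 + 1 else st.2))
          (acc, 0) (PySem.List.slice (pvHL a b n) (some (first.getD v 0)) none)).1
      = (pvEmitL a b n v).foldl pvAddC acc := by
    intro acc v hv
    obtain ⟨j, hj, hjn, hPj⟩ := pv_key_first a b n v (by unfold pvKeysL; exact hv)
    have hfv : pvFv a b n v = j := by unfold pvFv; rw [hj]; rfl
    have hgetD : first.getD v 0 = (j : Int) := by
      rw [PySem.Dict.getD_eq_get?_getD, hget v, hj]
      rfl
    have hdrop : (pvHL a b n).drop j = (List.range' j (n + 1 - j)).map (fun t => pvP a b t) := by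
      unfold pvHL
      rw [← List.map_drop, List.range_eq_range', List.drop_range']
      simp
    rw [hgetD, PySem.List.slice_from_natCast, hdrop, pv_sweep v (pvMc a b n - v)]
    have hzero : (0 : Int) = ((pvCnt a b v j : Nat) : Int) := by
      rw [pv_cnt_before_first a b n v j hj j le_rfl]
      rfl
    rw [hzero, pv_emit_closed a b v (pvMc a b n - v) (n + 1 - j) j]
    unfold pvEmitL
    rw [hfv]
  rw [PySem.List.foldl_congr_mem _ _
    (fun acc v => (pvEmitL a b n v).foldl pvAddC acc) _ hbody]
  rw [pv_foldl_foldl_flatMap]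
  have hbound : ∀ p ∈ (PySem.Set.ofList (pvHL a b n)).flatMap (pvEmitL a b n),
      0 ≤ p.1 ∧ p.1 < ((List.replicate ((n : Int) + 1).toNat (0 : Int)).length : Int) := by
    intro p hp
    rw [List.mem_flatMap] at hp
    obtain ⟨v, hv, hpv⟩ := hp
    obtain ⟨j, hj, hjn, hPj⟩ := pv_key_first a b n v (by unfold pvKeysL; exact hv)
    have hfv : pvFv a b n v = j := by unfold pvFv; rw [hj]; rfl
    unfold pvEmitL at hpv
    rw [hfv, List.mem_map] at hpv
    obtain ⟨u, hu, rfl⟩ := hpv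
    rw [List.mem_range'_1] at hu
    have hb := pv_idx_bound a b n j u (by omega) (by omega)
    rw [hPj] at hb
    have hcast : (((List.replicate ((n : Int) + 1).toNat (0 : Int)).length : Nat) : Int)
        = (n : Int) + 1 := by
      rw [List.length_replicate]
      omega
    rw [hcast]
    constructor
    · omega
    · omega
  apply List.ext_getElem
  · rw [pv_addc_length, List.length_replicate, List.length_map,
        PySem.List.length_pyRange_one]
    omega
  · intro k hk1 hk2
    have hk : k < n + 1 := by
      rw [pv_addc_length, List.length_replicate] at hk1
      omega
    rw [pv_addc_sum _ _ hbound k (by rw [List.length_replicate]; omega)]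
    rw [List.getElem_replicate, List.getElem_map, PySem.List.getElem_pyRange_one]
    rw [List.map_flatMap, pv_sum_flatMap]
    have hperv : ∀ v ∈ PySem.Set.ofList (pvHL a b n),
        (((pvEmitL a b n v).map
            (fun p => if p.1 = (k : Int) then p.2 else 0)).sum)
        = ∑ u ∈ Finset.range (n + 1), (if pvP a b u = v + ((k : Int) - pvMc a b n) then
            (∑ t ∈ Finset.range (n + 1), if t < u ∧ pvP a b t = v then (1 : Int) else 0) else 0) := by
      intro v hv
      obtain ⟨j, hj, hjn, hPj⟩ := pv_key_first a b n v (by unfold pvKeysL; exact hv)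
      have hfv : pvFv a b n v = j := by unfold pvFv; rw [hj]; rfl
      unfold pvEmitL
      rw [hfv, List.map_map]
      have hzero : ((List.range' 0 j).map
          ((fun p : Int × Int => if p.1 = (k : Int) then p.2 else 0) ∘
            (fun u => (pvMc a b n - v + pvP a b u, ((pvCnt a b v u : Nat) : Int))))).sum = 0 := by
        apply List.sum_eq_zero
        intro x hx
        rw [List.mem_map] at hx
        obtain ⟨u, hu, rfl⟩ := hx
        rw [List.mem_range'_1] at hu
        simp only [Function.comp_def]
        rw [pv_cnt_before_first a b n v j hj u (by omega)]
        simp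
      have hsplit : (((List.range (n + 1)).map
          ((fun p : Int × Int => if p.1 = (k : Int) then p.2 else 0) ∘
            (fun u => (pvMc a b n - v + pvP a b u, ((pvCnt a b v u : Nat) : Int))))).sum)
          = (((List.range' j (n + 1 - j)).map
          ((fun p : Int × Int => if p.1 = (k : Int) then p.2 else 0) ∘
            (fun u => (pvMc a b n - v + pvP a b u, ((pvCnt a b v u : Nat) : Int))))).sum) := by
        have hr : List.range (n + 1) = List.range' 0 j ++ List.range' j (n + 1 - j) := by
          rw [List.range_eq_range']
          have h3 := @List.range'_append_1 0 j (n + 1 - j)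
          simp only [Nat.zero_add] at h3
          rw [h3]
          congr 1
          omega
        rw [hr, List.map_append, List.sum_append, hzero, zero_add]
      rw [← hsplit, pv_sum_map_range]
      apply Finset.sum_congr rfl
      intro u hu
      rw [Finset.mem_range] at hu
      simp only [Function.comp_def]
      by_cases hcond : pvP a b u = v + ((k : Int) - pvMc a b n)
      · rw [if_pos hcond, if_pos (by omega), pv_cnt_ext a b n v u (by omega)]
      · rw [if_neg hcond, if_neg (by intro hcon; exact hcond (by omega))]
    rw [List.map_congr_left hperv]
    have htot := pv_total a b n (k : Int)
    unfold pvKeysL at htot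
    rw [htot]
    simp

-- the two ports agree for nonnegative N
theorem pv_main (a b : List Int) (n : Nat) :
    count_cows (n : Int) a b = count_cows_alt (n : Int) a b := by
  rw [pv_A_mapcount, pv_B_mapG]
  apply List.map_congr_left
  intro m _
  rw [pv_countA_G]

-- ===== VERDICT (by name: the statement is the Claim_ definition above) =====
theorem count_cows_spec : Claim_equal_count_cows := by
  intro N a b _hDom _hPre
  unfold Spec_count_cows
  rcases Int.lt_or_le N 0 with hN | hN
  · have h1 : N ≤ (0 : Int) := by omega
    have h2 : N + 1 ≤ (0 : Int) := by omega
    have ht : (N + 1).toNat = 0 := by omega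
    unfold count_cows count_cows_alt
    rw [PySem.List.pyRange_one_eq_nil h1, PySem.List.pyRange_one_eq_nil h2]
    simp [ht, PySem.Dict.empty]
  · obtain ⟨n, rfl⟩ : ∃ n : Nat, N = (n : Int) := ⟨N.toNat, by omega⟩
    exact pv_main a b n
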